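-- pv_equiv track=rewrite | github.com/gayathrigollapudi/Plagiarism-Detector-in-Python | BagOfWords.py | removespecialchar
-- ===== SOURCE A (Python) =====
-- def removespecialchar(s):
-- 	st=''
-- 	s1=''
-- 	for i in s:
-- 		if (ord(i)<123 and ord(i)>96) or (ord(i)<58 and ord(i)>47) or i=='_':
-- 			st+=i
-- 		elif(i==" "):
-- 			s1+=(st+i)
-- 			st=""
-- 	s1+=st
-- 	return list(s1.split())
-- ===== SOURCE B (Python) =====
-- def removespecialchar(s):
--     res = []
--     for w in s.split(' '):
--         cleaned = ''.join(c for c in w if (97 <= ord(c) < 123) or (48 <= ord(c) < 58) or c == '_')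
--         if cleaned:
--             res.append(cleaned)
--     return res
-- ===== Notes on version B (the rewrite author's own statement) =====
-- stated objective: alternative
-- what changed: A runs a single char-by-char state machine (current-run buffer flushed on space characters, then a whitespace split); B instead splits the input on single-space separators first, then filters each word's characters and keeps the non-empty cleaned words.
import Mathlib
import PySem

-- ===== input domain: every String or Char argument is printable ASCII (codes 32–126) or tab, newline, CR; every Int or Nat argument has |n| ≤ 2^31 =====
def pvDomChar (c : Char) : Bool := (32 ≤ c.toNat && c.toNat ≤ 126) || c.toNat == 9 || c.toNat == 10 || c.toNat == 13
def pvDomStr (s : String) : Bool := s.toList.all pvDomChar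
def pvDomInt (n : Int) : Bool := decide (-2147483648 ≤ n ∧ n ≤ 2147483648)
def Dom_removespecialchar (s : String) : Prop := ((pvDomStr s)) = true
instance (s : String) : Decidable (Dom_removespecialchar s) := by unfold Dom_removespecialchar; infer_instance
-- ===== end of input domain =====

-- B re-implements A by splitting on literal spaces first and then filtering each word's
-- characters (outer word loop + inner char filter, vs A's single char-by-char state machine);
-- objective: alternative decomposition, same cost.


-- the character test both Pythons share: (96 < ord(c) < 123) or (47 < ord(c) < 58) or c == '_'
def pvKeep (c : Char) : Bool := ((c.toNat < 123 && 96 < c.toNat) || (c.toNat < 58 && 47 < c.toNat)) || c == '_'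

-- ===== PORT A =====
-- state machine over the characters: st = current run of kept chars, s1 = flushed output;
-- at the end s1 += st and the result is s1.split()
def pvStepA (acc : List Char × List Char) (i : Char) : List Char × List Char :=
  if pvKeep i then (acc.1 ++ [i], acc.2)
  else if i == ' ' then ([], acc.2 ++ (acc.1 ++ [i]))
  else acc

def removespecialchar (s : String) : List String :=
  let r := s.toList.foldl pvStepA (([] : List Char), ([] : List Char))
  (PySem.Chars.split₀ (r.2 ++ r.1)).map String.ofList

-- ===== PORT B =====
-- split on literal ' ' first, clean each word with the char filter, keep non-empty results
def pvStepB (res : List String) (w : List Char) : List String :=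
  let cleaned := w.filter pvKeep
  if cleaned.isEmpty then res else res ++ [String.ofList cleaned]

def removespecialchar_alt (s : String) : List String :=
  (PySem.Chars.splitOn s.toList [' ']).foldl pvStepB []

-- ===== PRECONDITION & SPEC =====
def Spec_removespecialchar (s : String) (out : List String) : Prop := out = removespecialchar_alt s
instance (s : String) (out : List String) : Decidable (Spec_removespecialchar s out) := by unfold Spec_removespecialchar; infer_instance

-- ===== CLAIM (what is proved, stated in full; the proofs are below) =====
def Claim_equal_removespecialchar : Prop := ∀ (s : String), Dom_removespecialchar s → Spec_removespecialchar s (removespecialchar s)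

-- ===== LEMMAS AND PROOFS =====

-- kept-or-space characters
def pvP (c : Char) : Bool := pvKeep c || c == ' '

-- A's fold: the final s1 ++ st is exactly the kept-or-space characters of the input, in order
theorem pvFoldA (cs : List Char) : ∀ st s1 : List Char,
    (cs.foldl pvStepA (st, s1)).2 ++ (cs.foldl pvStepA (st, s1)).1
    = s1 ++ st ++ cs.filter pvP := by
  induction cs with
  | nil => intro st s1; simp
  | cons c rest ih =>
    intro st s1
    by_cases hk : pvKeep c = true
    · have hstep : pvStepA (st, s1) c = (st ++ [c], s1) := by simp [pvStepA, hk]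
      rw [List.foldl_cons, hstep, ih]
      simp [pvP, hk]
    · by_cases hsp : (c == ' ') = true
      · have hstep : pvStepA (st, s1) c = ([], s1 ++ (st ++ [c])) := by simp [pvStepA, hk, hsp]
        rw [List.foldl_cons, hstep, ih]
        have : c = ' ' := eq_of_beq hsp
        subst this
        simp [pvP]
      · have hstep : pvStepA (st, s1) c = (st, s1) := by simp [pvStepA, hk, hsp]
        rw [List.foldl_cons, hstep, ih]
        simp [pvP, hk, hsp]

theorem pvCharOfToNat (c : Char) (h : c.toNat = 32) : c = ' ' := by
  rcases c with ⟨v, hv⟩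
  have hv32 : v = 32 := UInt32.toNat_inj.mp h
  subst hv32; rfl

-- a character passing pvP is whitespace iff it is the space character
theorem pvIsspaceOfP (c : Char) (h : pvP c = true) : PySem.Chars.isspace c = (c == ' ') := by
  have hn : (96 < c.toNat ∧ c.toNat < 123) ∨ (47 < c.toNat ∧ c.toNat < 58) ∨ c.toNat = 95 ∨ c.toNat = 32 := by
    simp [pvP, pvKeep] at h
    rcases h with ((⟨h1, h2⟩ | ⟨h1, h2⟩) | h3) | h4
    · left; omega
    · right; left; omega
    · subst h3; right; right; left; rfl
    · subst h4; right; right; right; rfl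
  have hbeq : (c == ' ') = decide (c.toNat = 32) := by
    by_cases hc : c = ' '
    · subst hc; decide
    · have h32 : c.toNat ≠ 32 := fun h' => hc (pvCharOfToNat c h')
      simp [hc, h32]
  rw [hbeq, Bool.eq_iff_iff]
  simp [PySem.Chars.isspace]
  omega

theorem pvModifyHeadNilAppend (L : List (List Char)) :
    L.modifyHead (fun x => x) = L := by cases L <;> simp

theorem pvModifyHeadMap {f g g' : List Char → List Char} (h : ∀ x, f (g x) = g' (f x))
    (L : List (List Char)) : (L.modifyHead g).map f = (L.map f).modifyHead g' := by
  cases L <;> simp [h]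

-- PySem's split-on-" " is Mathlib's splitOnP on (· == ' ')
theorem pvSplitOnSpaceGo (l : List Char) : ∀ (fuel : Nat) (cur : List Char) (acc : List (List Char)),
    l.length < fuel →
    PySem.Chars.splitOn.go [' '] fuel l cur acc
      = acc.reverse ++ (l.splitOnP (· == ' ')).modifyHead (fun x => cur.reverse ++ x) := by
  induction l with
  | nil =>
    intro fuel cur acc hf
    cases fuel with
    | zero => omega
    | succ f => simp [PySem.Chars.splitOn.go]
  | cons c rest ih =>
    intro fuel cur acc hf
    cases fuel with
    | zero => omega
    | succ f =>
      by_cases hsp : (c == ' ') = true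
      · have hceq : c = ' ' := eq_of_beq hsp
        subst hceq
        have hgo : PySem.Chars.splitOn.go [' '] (f + 1) (' ' :: rest) cur acc
            = PySem.Chars.splitOn.go [' '] f rest [] (cur.reverse :: acc) := by
          simp [PySem.Chars.splitOn.go, List.isPrefixOf]
        rw [hgo, ih f [] (cur.reverse :: acc) (by simpa using Nat.lt_of_succ_lt_succ hf)]
        simp [List.splitOnP_cons, pvModifyHeadNilAppend]
      · have hsp' : (' ' == c) = false := by
          simp only [beq_eq_false_iff_ne, ne_eq]
          intro h'; exact absurd (by simp [← h']) hsp
        have hgo : PySem.Chars.splitOn.go [' '] (f + 1) (c :: rest) cur acc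
            = PySem.Chars.splitOn.go [' '] f rest (c :: cur) acc := by
          simp [PySem.Chars.splitOn.go, List.isPrefixOf, hsp']
        rw [hgo, ih f (c :: cur) acc (by simpa using Nat.lt_of_succ_lt_succ hf)]
        rw [List.splitOnP_cons]
        simp [hsp, List.modifyHead_modifyHead, Function.comp_def]

theorem pvSplitOnSpace (cs : List Char) :
    PySem.Chars.splitOn cs [' '] = cs.splitOnP (· == ' ') := by
  show PySem.Chars.splitOn.go [' '] (cs.length + 1) cs [] [] = _
  rw [pvSplitOnSpaceGo cs (cs.length + 1) [] [] (by omega)]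
  simp [pvModifyHeadNilAppend]

-- split₀ on a string whose only whitespace is ' ' = splitOnP (· == ' ') with empties dropped
theorem pvSplit0Go (ds : List Char) : ∀ (cur : List Char) (acc : List (List Char)),
    (∀ c ∈ ds, PySem.Chars.isspace c = (c == ' ')) →
    PySem.Chars.split₀.go ds cur acc
      = acc.reverse ++ (((ds.splitOnP (· == ' ')).modifyHead (fun x => cur.reverse ++ x)).filter
          (fun w => !w.isEmpty)) := by
  induction ds with
  | nil =>
    intro cur acc _
    by_cases hc : cur.isEmpty = true
    · have : cur = [] := by simpa [List.isEmpty_iff] using hc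
      subst this; simp [PySem.Chars.split₀.go]
    · simp [PySem.Chars.split₀.go, hc, List.splitOnP_nil]
  | cons c rest ih =>
    intro cur acc h
    have hc := h c (by simp)
    have hrest : ∀ c ∈ rest, PySem.Chars.isspace c = (c == ' ') := fun x hx => h x (by simp [hx])
    by_cases hsp : (c == ' ') = true
    · by_cases hcur : cur.isEmpty = true
      · have hcur' : cur = [] := by simpa [List.isEmpty_iff] using hcur
        subst hcur'
        simp only [PySem.Chars.split₀.go, hc, hsp, if_true, List.isEmpty_nil]
        rw [ih [] acc hrest]
        simp [List.splitOnP_cons, hsp, pvModifyHeadNilAppend]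
      · simp only [PySem.Chars.split₀.go, hc, hsp, if_true, hcur]
        rw [ih [] (cur.reverse :: acc) hrest]
        have hne : (cur.reverse.isEmpty = false) := by
          simp [List.isEmpty_eq_false_iff] at hcur ⊢
          simpa using hcur
        simp [List.splitOnP_cons, hsp, pvModifyHeadNilAppend, hne]
    · simp only [PySem.Chars.split₀.go, hc, hsp]
      rw [ih (c :: cur) acc hrest]
      rw [List.splitOnP_cons]
      simp [hsp, List.modifyHead_modifyHead, Function.comp_def]

theorem pvSplit0 (ds : List Char) (h : ∀ c ∈ ds, PySem.Chars.isspace c = (c == ' ')) :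
    PySem.Chars.split₀ ds = (ds.splitOnP (· == ' ')).filter (fun w => !w.isEmpty) := by
  show PySem.Chars.split₀.go ds [] [] = _
  rw [pvSplit0Go ds [] [] h]
  simp [pvModifyHeadNilAppend]

-- cleaning each token = splitting the cleaned-with-spaces string
theorem pvMapFilterSplit (cs : List Char) :
    (cs.splitOnP (· == ' ')).map (·.filter pvKeep)
      = (cs.filter pvP).splitOnP (· == ' ') := by
  induction cs with
  | nil => simp [List.splitOnP_nil]
  | cons c rest ih =>
    by_cases hsp : (c == ' ') = true
    · have hceq : c = ' ' := eq_of_beq hsp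
      subst hceq
      simp [List.splitOnP_cons, pvP, ih]
    · by_cases hk : pvKeep c = true
      · rw [List.splitOnP_cons, if_neg (by simp [hsp])]
        rw [pvModifyHeadMap (g' := (c :: ·)) (fun x => by simp [List.filter, hk]), ih]
        simp [pvP, hk, hsp, List.splitOnP_cons]
      · rw [List.splitOnP_cons, if_neg (by simp [hsp])]
        rw [pvModifyHeadMap (g' := id) (fun x => by simp [List.filter, hk]), ih]
        simp [pvP, hk, hsp]

-- B's loop over the tokens = filter-and-map of the token list
theorem pvFoldB (ts : List (List Char)) : ∀ res : List String,
    ts.foldl pvStepB res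
    = res ++ ((ts.map (·.filter pvKeep)).filter (fun w => !w.isEmpty)).map String.ofList := by
  induction ts with
  | nil => intro res; simp
  | cons w rest ih =>
    intro res
    by_cases he : (w.filter pvKeep).isEmpty = true
    · have hstep : pvStepB res w = res := by simp [pvStepB, he]
      rw [List.foldl_cons, hstep, ih]
      simp [he]
    · have hstep : pvStepB res w = res ++ [String.ofList (w.filter pvKeep)] := by
        simp [pvStepB, he]
      rw [List.foldl_cons, hstep, ih]
      simp [he]

-- ===== VERDICT (by name: the statement is the Claim_ definition above) =====
theorem removespecialchar_spec : Claim_equal_removespecialchar := by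
  intro s _
  unfold Spec_removespecialchar removespecialchar removespecialchar_alt
  rw [pvFoldB, pvSplitOnSpace, pvMapFilterSplit]
  have h : ∀ c ∈ s.toList.filter pvP, PySem.Chars.isspace c = (c == ' ') := by
    intro c hc
    exact pvIsspaceOfP c (List.of_mem_filter hc)
  simp only [pvFoldA s.toList [] []]
  simp [pvSplit0 _ h]
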